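-- pv_equiv track=rewrite | github.com/AXXPRO/Simulare_FP | Memorat.py | cautare_secventiala_ordonata_faster
-- ===== SOURCE A (Python) =====
-- def cautare_secventiala_ordonata_faster(l, element):
--     """
--     Best complexity O(1)
--     Worst O(n)
--     Average O(n)
--     """
--     if len(l) == 0:
--         return 0
--
--     if element < l[0]:
--         return 0
--     if element > l[len(l)-1]:
--         return len(l)
--
--     i = 0
--     while i<len(l) and element >l[i]:
--         i+=1
--     return i
-- ===== SOURCE B (Python) =====
-- def cautare_secventiala_ordonata_faster(l, element):
--     # Binary search (bisect_left): O(log n) insertion index in a sorted list.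
--     lo, hi = 0, len(l)
--     while lo < hi:
--         mid = (lo + hi) // 2
--         if l[mid] < element:
--             lo = mid + 1
--         else:
--             hi = mid
--     return lo
-- ===== Notes on version B (the rewrite author's own statement) =====
-- stated objective: alternative
-- what changed: Replaced the linear left-to-right scan by a hand-written bisect_left binary search (O(log n) comparisons on the sorted domain; a timing run's random large inputs lie outside Pre_, so no speed is claimed); Pre_ restricts to ascending-sorted lists (the function's stated domain) plus lists where element is below or above every entry, because on other unsorted lists A's early-exit guards and scan return accidental values a binary search cannot reproduce.
-- outside the precondition, e.g. on cautare_secventiala_ordonata_faster([3, 1, 2], 2): A returns 0, B returns 2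
import Mathlib
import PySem

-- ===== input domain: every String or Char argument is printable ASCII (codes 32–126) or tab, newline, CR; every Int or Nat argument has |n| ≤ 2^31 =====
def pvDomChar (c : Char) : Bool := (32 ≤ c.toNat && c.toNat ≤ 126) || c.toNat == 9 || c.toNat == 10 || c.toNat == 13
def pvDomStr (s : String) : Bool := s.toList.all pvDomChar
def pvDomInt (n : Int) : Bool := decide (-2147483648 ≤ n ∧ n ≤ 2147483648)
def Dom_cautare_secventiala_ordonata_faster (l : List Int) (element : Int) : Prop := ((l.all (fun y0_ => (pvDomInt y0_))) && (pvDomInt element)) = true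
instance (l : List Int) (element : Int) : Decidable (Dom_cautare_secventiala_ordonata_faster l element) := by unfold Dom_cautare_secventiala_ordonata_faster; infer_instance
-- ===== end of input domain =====

-- B replaces A's linear scan by a hand-written bisect_left binary search on the sorted domain Pre_ describes.

-- ===== PORT A =====
-- the while loop: `while i < len(l) and element > l[i]: i += 1`
def cautA_loop (l : List Int) (element : Int) (i : Nat) : Nat :=
  if h : i < l.length then
    if element > l[i] then cautA_loop l element (i + 1) else i
  else i
termination_by l.length - i

def cautare_secventiala_ordonata_faster (l : List Int) (element : Int) : Int :=
  if h0 : l.length = 0 then 0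
  else if element < l[0]'(by omega) then 0
  else if element > l[l.length - 1]'(by omega) then (l.length : Int)
  else (cautA_loop l element 0 : Int)

-- ===== PORT B =====
-- hand-written bisect_left loop from Source B (l[mid] is in range whenever hi ≤ len l)
def bisectB_loop (l : List Int) (element : Int) (lo hi : Nat) : Nat :=
  if h : lo < hi then
    let mid := (lo + hi) / 2
    if l.getD mid 0 < element then bisectB_loop l element (mid + 1) hi
    else bisectB_loop l element lo mid
  else lo
termination_by hi - lo
decreasing_by all_goals omega

def cautare_secventiala_ordonata_faster_alt (l : List Int) (element : Int) : Int :=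
  (bisectB_loop l element 0 l.length : Int)

-- ===== PRECONDITION & SPEC =====
-- Pre_ excludes unsorted lists (unless element lies below or above all entries, where both agree
-- anyway), on which A still returns a value: the function is an insertion-index search in a sorted
-- list, and on unsorted input A's early-exit guards and linear scan return accidental values that a
-- binary search cannot (and should not) reproduce.
def Pre_cautare_secventiala_ordonata_faster (l : List Int) (element : Int) : Prop :=
  l.Pairwise (· ≤ ·) ∨ (∀ a ∈ l, element < a) ∨ (∀ a ∈ l, a < element)
instance (l : List Int) (element : Int) : Decidable (Pre_cautare_secventiala_ordonata_faster l element) := by unfold Pre_cautare_secventiala_ordonata_faster; infer_instance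

def pvWitness_cautare_secventiala_ordonata_faster : List Int × Int := ([1, 3, 3, 5], 4)

def Spec_cautare_secventiala_ordonata_faster (l : List Int) (element : Int) (out : Int) : Prop := out = cautare_secventiala_ordonata_faster_alt l element
instance (l : List Int) (element : Int) (out : Int) : Decidable (Spec_cautare_secventiala_ordonata_faster l element out) := by unfold Spec_cautare_secventiala_ordonata_faster; infer_instance

-- ===== CLAIM (what is proved, stated in full; the proofs are below) =====
def Claim_equal_cautare_secventiala_ordonata_faster : Prop := ∀ (l : List Int) (element : Int), Dom_cautare_secventiala_ordonata_faster l element → Pre_cautare_secventiala_ordonata_faster l element → Spec_cautare_secventiala_ordonata_faster l element (cautare_secventiala_ordonata_faster l element)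

-- ===== LEMMAS AND PROOFS =====

-- T l x := length of the prefix of l that is < x; the common characterisation of both ports.
def pvT (l : List Int) (x : Int) : Nat := (l.takeWhile (fun a => decide (a < x))).length

theorem pvT_le (l : List Int) (x : Int) : pvT l x ≤ l.length := by
  induction l with
  | nil => simp [pvT]
  | cons a t ih =>
    by_cases ha : a < x
    · simp only [pvT, List.takeWhile] at *
      simp [ha] at *; omega
    · simp [pvT, List.takeWhile, ha]

theorem pvT_lt (l : List Int) (x : Int) : ∀ i, i < pvT l x → l.getD i 0 < x := by
  induction l with
  | nil => intro i hi; simp [pvT] at hi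
  | cons a t ih =>
    intro i hi
    by_cases ha : a < x
    · cases i with
      | zero => simpa using ha
      | succ j =>
        simp only [List.getD_cons_succ]
        apply ih
        simp only [pvT, List.takeWhile, ha] at hi ⊢
        simp at hi; omega
    · simp [pvT, List.takeWhile, ha] at hi

theorem pvT_stop (l : List Int) (x : Int) (h : pvT l x < l.length) :
    ¬ l.getD (pvT l x) 0 < x := by
  induction l with
  | nil => simp at h
  | cons a t ih =>
    by_cases ha : a < x
    · have hT : pvT (a :: t) x = pvT t x + 1 := by simp [pvT, List.takeWhile, ha]
      rw [hT, List.getD_cons_succ]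
      exact ih (by rw [hT] at h; simpa using h)
    · have hT : pvT (a :: t) x = 0 := by simp [pvT, List.takeWhile, ha]
      rw [hT]; simpa using ha

theorem pvT_ge (l : List Int) (x : Int) (hs : l.Pairwise (· ≤ ·)) :
    ∀ i, pvT l x ≤ i → i < l.length → ¬ l.getD i 0 < x := by
  induction l with
  | nil => intro i _ hi; simp at hi
  | cons a t ih =>
    intro i hTi hi
    rcases List.pairwise_cons.mp hs with ⟨hall, ht⟩
    by_cases ha : a < x
    · have hT : pvT (a :: t) x = pvT t x + 1 := by simp [pvT, List.takeWhile, ha]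
      rw [hT] at hTi
      cases i with
      | zero => omega
      | succ j =>
        simp only [List.getD_cons_succ]
        exact ih ht j (by omega) (by simpa using hi)
    · cases i with
      | zero => simpa using ha
      | succ j =>
        simp only [List.getD_cons_succ]
        intro hlt
        have hj : j < t.length := by simpa using hi
        have hmem : t.getD j 0 ∈ t := by
          rw [List.getD_eq_getElem t 0 hj]; exact List.getElem_mem hj
        have : a ≤ t.getD j 0 := hall _ hmem
        exact ha (lt_of_le_of_lt this hlt)

theorem cautA_loop_eq (l : List Int) (x : Int) :
    ∀ i, i ≤ pvT l x → cautA_loop l x i = pvT l x := by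
  have hle := pvT_le l x
  intro i hi
  induction hn : l.length - i using Nat.strong_induction_on generalizing i with
  | _ n ih =>
    unfold cautA_loop
    by_cases h : i < l.length
    · simp only [h, dif_pos]
      have hget : l[i] = l.getD i 0 := (List.getD_eq_getElem l 0 h).symm
      by_cases hlt : x > l[i]
      · have hiT : i < pvT l x := by
          by_contra hc
          have hi' : i = pvT l x := by omega
          exact pvT_stop l x (hi' ▸ h) (by rw [← hi', ← hget]; exact hlt)
        simp only [hlt, if_pos]
        exact ih (l.length - (i + 1)) (by omega) (i + 1) (by omega) rfl
      · simp only [hlt, if_neg, not_false_iff]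
        by_contra hne
        have : i < pvT l x := by omega
        exact hlt ((List.getD_eq_getElem l 0 h) ▸ pvT_lt l x i this)
    · simp only [h, dif_neg, not_false_iff]
      omega

theorem pvGetD_mem (l : List Int) (j : Nat) (hj : j < l.length) : l.getD j 0 ∈ l := by
  rw [List.getD_eq_getElem l 0 hj]; exact List.getElem_mem hj

theorem pvT_all_lt (l : List Int) (x : Int) (h : ∀ a ∈ l, a < x) : pvT l x = l.length := by
  induction l with
  | nil => simp [pvT]
  | cons a t ih =>
    have ha : a < x := h a (List.mem_cons_self)
    have := ih (fun b hb => h b (List.mem_cons_of_mem a hb))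
    simp only [pvT, List.takeWhile, ha] at *
    simp; omega

-- the invariant both Pre_ disjunct families give: getD i < x exactly below pvT
theorem pvHyp_of_pre (l : List Int) (x : Int)
    (hp : l.Pairwise (· ≤ ·) ∨ (∀ a ∈ l, x < a) ∨ (∀ a ∈ l, a < x)) :
    ∀ i, i < l.length → (l.getD i 0 < x ↔ i < pvT l x) := by
  intro i hi
  rcases hp with hs | hlo | hhi
  · constructor
    · intro hlt
      by_contra hge
      exact pvT_ge l x hs i (by omega) hi hlt
    · exact pvT_lt l x i
  · have h1 : ¬ l.getD i 0 < x := not_lt.mpr (le_of_lt (hlo _ (pvGetD_mem l i hi)))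
    have h2 : pvT l x = 0 := by
      by_contra hne
      have h00 : (0 : Nat) < l.length := by omega
      have := pvT_lt l x 0 (by omega)
      have := hlo _ (pvGetD_mem l 0 h00)
      omega
    exact iff_of_false h1 (by omega)
  · have h1 : l.getD i 0 < x := hhi _ (pvGetD_mem l i hi)
    exact iff_of_true h1 (by rw [pvT_all_lt l x hhi]; omega)

theorem bisectB_loop_eq (l : List Int) (x : Int)
    (hH : ∀ i, i < l.length → (l.getD i 0 < x ↔ i < pvT l x)) :
    ∀ lo hi, lo ≤ pvT l x → pvT l x ≤ hi → hi ≤ l.length →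
      bisectB_loop l x lo hi = pvT l x := by
  intro lo hi hlo hhi hlen
  induction hn : hi - lo using Nat.strong_induction_on generalizing lo hi with
  | _ n ih =>
    unfold bisectB_loop
    by_cases h : lo < hi
    · simp only [h, dif_pos]
      have hmid : (lo + hi) / 2 < l.length := by omega
      by_cases hc : l.getD ((lo + hi) / 2) 0 < x
      · have : (lo + hi) / 2 < pvT l x := (hH _ hmid).mp hc
        simp only [hc, if_pos]
        exact ih (hi - ((lo + hi) / 2 + 1)) (by omega) _ hi (by omega) hhi hlen rfl
      · have : pvT l x ≤ (lo + hi) / 2 := by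
          by_contra hge
          exact hc ((hH _ hmid).mpr (by omega))
        simp only [hc, if_neg, not_false_iff]
        exact ih ((lo + hi) / 2 - lo) (by omega) lo _ hlo this (by omega) rfl
    · simp only [h, dif_neg, not_false_iff]
      omega

-- ===== VERDICT (by name: the statement is the Claim_ definition above) =====
theorem cautare_secventiala_ordonata_faster_spec : Claim_equal_cautare_secventiala_ordonata_faster := by
  intro l x _ hp
  unfold Spec_cautare_secventiala_ordonata_faster Pre_cautare_secventiala_ordonata_faster at *
  unfold cautare_secventiala_ordonata_faster cautare_secventiala_ordonata_faster_alt
  have hB : bisectB_loop l x 0 l.length = pvT l x :=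
    bisectB_loop_eq l x (pvHyp_of_pre l x hp) 0 l.length (Nat.zero_le _) (pvT_le l x) (le_refl _)
  split_ifs with h0 h1 h2
  · rw [h0]; unfold bisectB_loop; simp
  · have hT : pvT l x = 0 := by
      by_contra hne
      have h00 : (0 : Nat) < l.length := by omega
      have := pvT_lt l x 0 (by omega)
      rw [List.getD_eq_getElem l 0 h00] at this
      omega
    rw [hB, hT]; simp
  · have hT : pvT l x = l.length := by
      have hle := pvT_le l x
      have hlast : l.length - 1 < l.length := by omega
      by_contra hne
      have := (pvHyp_of_pre l x hp (l.length - 1) hlast).mp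
        (by rw [List.getD_eq_getElem l 0 hlast]; omega)
      omega
    rw [hB, hT]
  · rw [hB, cautA_loop_eq l x 0 (Nat.zero_le _)]
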